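-- pv_equiv track=rewrite | github.com/JVMerenda/DTW | sem título0.py | step
-- ===== SOURCE A (Python) =====
-- def step(pt, neighbors, memoria, rule):
--     L = []
--     for i in neighbors:
--         L.append(abs(pt[2] - i[2]))
--     if(rule =="min"):
--         minimus = min(L)
--         indice = L.index(minimus)
--         if(neighbors[indice] not in memoria):
--             pt = neighbors[indice]
--         else:
--             sorte = L
--             sorte.sort()
--             indice = L.index(sorte[1])
--             pt = neighbors[indice]
--     if(rule == "max"):
--         maximus = max(L)
--         indice = L.index(maximus)
--         if(neighbors[indice] not in memoria):
--             pt = neighbors[indice]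
--         else:
--             sorte = L
--             sorte.sort(reverse=True)
--             indice = L.index(sorte[1])
--             pt = neighbors[indice]
--     return pt
-- ===== SOURCE B (Python) =====
-- def step(pt, neighbors, memoria, rule):
--     if rule != "min" and rule != "max":
--         return pt
--     K = [abs(pt[2] - nb[2]) for nb in neighbors]
--     m = min(K) if rule == "min" else max(K)
--     i = K.index(m)
--     if neighbors[i] not in memoria:
--         return neighbors[i]
--     v2 = min(K[:i] + K[i+1:]) if rule == "min" else max(K[:i] + K[i+1:])
--     return neighbors[K.index(v2)]
-- ===== Notes on version B (the rewrite author's own statement) =====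
-- stated objective: simpler
-- what changed: B drops the sort entirely: one extremum pass picks the neighbor, and the fallback takes the extremum of the distance list with that element removed, looked up at its original index; this also fixes A's aliasing slip 'sorte = L', which makes A re-index the already-sorted list.
-- intended difference: When the closest (rule 'min') / farthest (rule 'max') neighbor is already in memoria, A's fallback sorts the distance list in place ('sorte = L' aliases L) and then looks the second-best value up in the sorted list, so it always returns neighbors[0] or neighbors[1]; B returns the neighbor at the second-best distance's original index, which is what the fallback plainly intends. — e.g. on step([0, 0, 0], [[0, 0, 5], [0, 0, 1], [0, 0, 2]], [[0, 0, 1]], "min"): A returns [0, 0, 1], B returns [0, 0, 2]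
import Mathlib
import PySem

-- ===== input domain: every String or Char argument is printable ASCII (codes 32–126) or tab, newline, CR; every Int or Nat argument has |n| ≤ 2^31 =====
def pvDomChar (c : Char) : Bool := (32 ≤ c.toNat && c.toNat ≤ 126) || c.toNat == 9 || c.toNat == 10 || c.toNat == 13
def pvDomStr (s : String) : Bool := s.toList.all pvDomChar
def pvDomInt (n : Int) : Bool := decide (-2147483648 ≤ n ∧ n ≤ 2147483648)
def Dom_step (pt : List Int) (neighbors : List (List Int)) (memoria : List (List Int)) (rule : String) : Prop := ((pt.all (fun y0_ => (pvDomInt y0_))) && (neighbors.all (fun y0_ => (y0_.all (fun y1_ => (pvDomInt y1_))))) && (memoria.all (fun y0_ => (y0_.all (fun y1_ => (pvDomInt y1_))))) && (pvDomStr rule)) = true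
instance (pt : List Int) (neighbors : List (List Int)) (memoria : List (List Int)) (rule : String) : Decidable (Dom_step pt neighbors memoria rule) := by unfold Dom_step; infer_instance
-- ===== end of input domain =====

-- B replaces A's sort-based fallback by plain extremum passes and fixes A's
-- 'sorte = L' aliasing slip (A re-indexes the already-sorted list); equivalence is
-- proved outside D_step, the region where that slip changes A's answer.

-- ===== PORT A =====
-- Port of A. In Python 'sorte = L; sorte.sort()' ALIASES L: afterwards L IS the sorted
-- list, so 'L.index(sorte[1])' searches the sorted list — transliterated as such.
-- The "max" branch reads the unsorted L because the only code that sorts L runs when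
-- rule == "min", which excludes rule == "max".  pyGetD/getD defaults stand for Python
-- exceptions; Pre_step keeps those inputs out.
def step (pt : List Int) (neighbors : List (List Int)) (memoria : List (List Int)) (rule : String) : List Int :=
  let L : List Int := neighbors.foldl (fun acc i => acc ++ [|PySem.List.pyGetD pt 2 0 - PySem.List.pyGetD i 2 0|]) []
  let pt1 :=
    if rule = "min" then
      let minimus := (PySem.List.min? L (fun x => x)).getD 0
      let indice : Nat := (PySem.List.index? L minimus).getD 0
      if PySem.List.pyGetD neighbors (indice : Int) [] ∉ memoria then
        PySem.List.pyGetD neighbors (indice : Int) []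
      else
        let sorte := PySem.List.sorted L (fun x => x) false
        let indice2 : Nat := (PySem.List.index? sorte (PySem.List.pyGetD sorte 1 0)).getD 0
        PySem.List.pyGetD neighbors (indice2 : Int) []
    else pt
  if rule = "max" then
    let maximus := (PySem.List.max? L (fun x => x)).getD 0
    let indice : Nat := (PySem.List.index? L maximus).getD 0
    if PySem.List.pyGetD neighbors (indice : Int) [] ∉ memoria then
      PySem.List.pyGetD neighbors (indice : Int) []
    else
      let sorte := PySem.List.sorted L (fun x => x) true
      let indice2 : Nat := (PySem.List.index? sorte (PySem.List.pyGetD sorte 1 0)).getD 0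
      PySem.List.pyGetD neighbors (indice2 : Int) []
  else pt1

-- ===== PORT B =====
-- Port of Source B: no sort; extremum of K, then extremum of K with position i removed
-- (K[:i] + K[i+1:]), looked up at its original index.
def step_alt (pt : List Int) (neighbors : List (List Int)) (memoria : List (List Int)) (rule : String) : List Int :=
  if rule ≠ "min" ∧ rule ≠ "max" then pt
  else
    let K : List Int := neighbors.map (fun nb => |PySem.List.pyGetD pt 2 0 - PySem.List.pyGetD nb 2 0|)
    let m : Int := if rule = "min" then (PySem.List.min? K (fun x => x)).getD 0 else (PySem.List.max? K (fun x => x)).getD 0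
    let i : Nat := (PySem.List.index? K m).getD 0
    if PySem.List.pyGetD neighbors (i : Int) [] ∉ memoria then
      PySem.List.pyGetD neighbors (i : Int) []
    else
      let rest := PySem.List.slice K none (some (i : Int)) ++ PySem.List.slice K (some ((i : Int) + 1)) none
      let v2 : Int := if rule = "min" then (PySem.List.min? rest (fun x => x)).getD 0 else (PySem.List.max? rest (fun x => x)).getD 0
      PySem.List.pyGetD neighbors (((PySem.List.index? K v2).getD 0 : Nat) : Int) []

-- ===== PRECONDITION & SPEC =====
-- Pre_step excludes exactly the inputs where A raises: pt[2] or a neighbor[2] out of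
-- range (IndexError, reached once the distance loop runs), min()/max() of the empty
-- distance list (ValueError, rule "min"/"max" with no neighbors), and sorte[1]
-- (IndexError) when the single neighbor is already in memoria.
def Pre_step (pt : List Int) (neighbors : List (List Int)) (memoria : List (List Int)) (rule : String) : Prop :=
  (neighbors ≠ [] → 3 ≤ pt.length ∧ ∀ nb ∈ neighbors, 3 ≤ nb.length)
  ∧ ((rule = "min" ∨ rule = "max") → neighbors ≠ [] ∧ (neighbors.length = 1 → neighbors.getD 0 [] ∉ memoria))
instance (pt : List Int) (neighbors : List (List Int)) (memoria : List (List Int)) (rule : String) : Decidable (Pre_step pt neighbors memoria rule) := by unfold Pre_step; infer_instance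
def pvWitness_step : List Int × List (List Int) × List (List Int) × String := ([0, 0, 0], [[0, 0, 1]], [], "min")

-- When the closest (rule "min") / farthest (rule "max") neighbor is already in memoria,
-- A's fallback sorts the distance list in place ('sorte = L' aliases L) and then looks
-- the second-best value up in the SORTED list, so it always returns neighbors[0] or
-- neighbors[1]; B returns the neighbor at the second-best distance's original index,
-- which is what the fallback plainly intends.
def D_step (pt : List Int) (neighbors : List (List Int)) (memoria : List (List Int)) (rule : String) : Prop :=
  (rule = "min" ∨ rule = "max") ∧
  (let L := neighbors.map (fun nb => |pt.getD 2 0 - nb.getD 2 0|)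
   let m := (if rule = "min" then L.min? else L.max?).getD 0
   let v := (if rule = "min" then (L.erase m).min? else (L.erase m).max?).getD 0
   neighbors.getD (L.idxOf m) [] ∈ memoria ∧
   neighbors.getD (if v = m then 0 else 1) [] ≠ neighbors.getD (L.idxOf v) [])
instance (pt : List Int) (neighbors : List (List Int)) (memoria : List (List Int)) (rule : String) : Decidable (D_step pt neighbors memoria rule) := by unfold D_step; infer_instance

def Spec_step (pt : List Int) (neighbors : List (List Int)) (memoria : List (List Int)) (rule : String) (out : List Int) : Prop := ¬ D_step pt neighbors memoria rule → out = step_alt pt neighbors memoria rule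
instance (pt : List Int) (neighbors : List (List Int)) (memoria : List (List Int)) (rule : String) (out : List Int) : Decidable (Spec_step pt neighbors memoria rule out) := by unfold Spec_step; infer_instance

def pvDiffWitness_step : List Int × List (List Int) × List (List Int) × String := ([0, 0, 0], [[0, 0, 5], [0, 0, 1], [0, 0, 2]], [[0, 0, 1]], "min")
def pvDiffWitnessOut_step : (List Int) × (List Int) := ([0, 0, 1], [0, 0, 2])

-- ===== CLAIM (what is proved, stated in full; the proofs are below) =====
def Claim_unchanged_step : Prop := ∀ (pt : List Int) (neighbors : List (List Int)) (memoria : List (List Int)) (rule : String), Dom_step pt neighbors memoria rule → Pre_step pt neighbors memoria rule → Spec_step pt neighbors memoria rule (step pt neighbors memoria rule)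
def Claim_changed_step : Prop := Dom_step (pvDiffWitness_step.1) (pvDiffWitness_step.2.1) (pvDiffWitness_step.2.2.1) (pvDiffWitness_step.2.2.2) ∧ Pre_step (pvDiffWitness_step.1) (pvDiffWitness_step.2.1) (pvDiffWitness_step.2.2.1) (pvDiffWitness_step.2.2.2) ∧ D_step (pvDiffWitness_step.1) (pvDiffWitness_step.2.1) (pvDiffWitness_step.2.2.1) (pvDiffWitness_step.2.2.2) ∧ step (pvDiffWitness_step.1) (pvDiffWitness_step.2.1) (pvDiffWitness_step.2.2.1) (pvDiffWitness_step.2.2.2) = pvDiffWitnessOut_step.1 ∧ step_alt (pvDiffWitness_step.1) (pvDiffWitness_step.2.1) (pvDiffWitness_step.2.2.1) (pvDiffWitness_step.2.2.2) = pvDiffWitnessOut_step.2 ∧ pvDiffWitnessOut_step.1 ≠ pvDiffWitnessOut_step.2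
def Claim_exact_step : Prop := ∀ (pt : List Int) (neighbors : List (List Int)) (memoria : List (List Int)) (rule : String), Dom_step pt neighbors memoria rule → Pre_step pt neighbors memoria rule → D_step pt neighbors memoria rule → step pt neighbors memoria rule ≠ step_alt pt neighbors memoria rule


-- ===== LEMMAS AND PROOFS =====

-- PySem's min?/max? (key = identity) return Lean's List.min?/List.max? value.
theorem pymin_eq_min? (L : List Int) : PySem.List.min? L (fun x => x) = L.min? := by
  cases h : PySem.List.min? L (fun x => x) with
  | none =>
    have : L = [] := by
      have := (PySem.List.min?_eq_none_iff (key := fun (x : Int) => x) (xs := L))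
      tauto
    simp [this]
  | some m =>
    have hm : m ∈ L := PySem.List.min?_mem h
    have hb : ∀ b ∈ L, m ≤ b := by
      intro b hbmem
      simpa using PySem.List.min?_isMin h b hbmem
    exact (List.min?_eq_some_iff.mpr ⟨hm, hb⟩).symm

theorem pymax_eq_max? (L : List Int) : PySem.List.max? L (fun x => x) = L.max? := by
  cases h : PySem.List.max? L (fun x => x) with
  | none =>
    have : L = [] := by
      have := (PySem.List.max?_eq_none_iff (key := fun (x : Int) => x) (xs := L))
      tauto
    simp [this]
  | some m =>
    have hm : m ∈ L := PySem.List.max?_mem h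
    have hb : ∀ b ∈ L, b ≤ m := by
      intro b hbmem
      simpa using PySem.List.max?_isMax h b hbmem
    exact (List.max?_eq_some_iff.mpr ⟨hm, hb⟩).symm

theorem idxOf?_of_mem (L : List Int) (a : Int) (h : a ∈ L) : L.idxOf? a = some (L.idxOf a) := by
  cases hio : L.idxOf? a with
  | none => exact absurd (List.idxOf?_eq_none_iff.mp hio) (by simpa using h)
  | some i =>
    have : L.idxOf a = i := by
      rw [List.idxOf_eq_getD_idxOf?, hio]; rfl
    rw [this]

theorem index?_getD_of_mem (L : List Int) (a : Int) (h : a ∈ L) :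
    ((PySem.List.index? L a).getD 0 : Nat) = L.idxOf a := by
  rw [PySem.List.index?_eq_idxOf?, idxOf?_of_mem L a h]
  rfl

-- The first two elements of the ascending sort are the minimum and the minimum of the
-- list with one copy of the minimum removed.
theorem sorted_two_min (L : List Int) (h2 : 2 ≤ L.length) :
    ∃ a b t, PySem.List.sorted L (fun x => x) false = a :: b :: t ∧
      L.min? = some a ∧ (L.erase a).min? = some b := by
  have hperm := PySem.List.sorted_perm L (fun x => x) false
  have hpw := PySem.List.sorted_pairwise L (fun x => x)
  have hlen : (PySem.List.sorted L (fun x => x) false).length = L.length := hperm.length_eq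
  match hs : PySem.List.sorted L (fun x => x) false, hlen with
  | a :: b :: t, _ =>
    rw [hs] at hperm hpw
    have hmema : a ∈ L := hperm.mem_iff.mp (by simp)
    have hpw' := List.pairwise_cons.mp hpw
    have hpwtail := List.pairwise_cons.mp hpw'.2
    have hamin : ∀ x ∈ L, a ≤ x := by
      intro x hx
      rcases List.mem_cons.mp (hperm.mem_iff.mpr hx) with h1 | h1
      · omega
      · exact hpw'.1 x h1
    have hperase : (b :: t).Perm (L.erase a) := by
      have := hperm.erase a
      simpa using this
    have hmemb : b ∈ L.erase a := hperase.mem_iff.mp (by simp)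
    have hbmin : ∀ x ∈ L.erase a, b ≤ x := by
      intro x hx
      rcases List.mem_cons.mp (hperase.mem_iff.mpr hx) with h1 | h1
      · omega
      · exact hpwtail.1 x h1
    exact ⟨a, b, t, rfl, List.min?_eq_some_iff.mpr ⟨hmema, hamin⟩,
      List.min?_eq_some_iff.mpr ⟨hmemb, hbmin⟩⟩
  | [], hl => simp at hl; omega
  | [x], hl => simp at hl; omega

theorem sorted_two_max (L : List Int) (h2 : 2 ≤ L.length) :
    ∃ a b t, PySem.List.sorted L (fun x => x) true = a :: b :: t ∧
      L.max? = some a ∧ (L.erase a).max? = some b := by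
  have hperm := PySem.List.sorted_perm L (fun x => x) true
  have hpw := PySem.List.sorted_pairwise_rev L (fun x => x)
  have hlen : (PySem.List.sorted L (fun x => x) true).length = L.length := hperm.length_eq
  match hs : PySem.List.sorted L (fun x => x) true, hlen with
  | a :: b :: t, _ =>
    rw [hs] at hperm hpw
    have hmema : a ∈ L := hperm.mem_iff.mp (by simp)
    have hpw' := List.pairwise_cons.mp hpw
    have hpwtail := List.pairwise_cons.mp hpw'.2
    have hamax : ∀ x ∈ L, x ≤ a := by
      intro x hx
      rcases List.mem_cons.mp (hperm.mem_iff.mpr hx) with h1 | h1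
      · omega
      · exact hpw'.1 x h1
    have hperase : (b :: t).Perm (L.erase a) := by
      have := hperm.erase a
      simpa using this
    have hmemb : b ∈ L.erase a := hperase.mem_iff.mp (by simp)
    have hbmax : ∀ x ∈ L.erase a, x ≤ b := by
      intro x hx
      rcases List.mem_cons.mp (hperase.mem_iff.mpr hx) with h1 | h1
      · omega
      · exact hpwtail.1 x h1
    exact ⟨a, b, t, rfl, List.max?_eq_some_iff.mpr ⟨hmema, hamax⟩,
      List.max?_eq_some_iff.mpr ⟨hmemb, hbmax⟩⟩
  | [], hl => simp at hl; omega
  | [x], hl => simp at hl; omega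

-- index into the sorted list a :: b :: t of the value b: 0 if a = b, else 1.
theorem index?_sorted_second (a b : Int) (t : List Int) :
    ((PySem.List.index? (a :: b :: t) b).getD 0 : Nat) = if b = a then 0 else 1 := by
  by_cases h : a = b
  · subst h
    rw [PySem.List.index?_cons_self]
    simp
  · rw [PySem.List.index?_cons_of_ne (b :: t) h, PySem.List.index?_cons_self]
    simp [Ne.symm h]

-- B's K[:i] + K[i+1:] at i = K.index(min) is K.erase min.
theorem slices_eq_erase (K : List Int) (m : Int) :
    PySem.List.slice K none (some ((K.idxOf m : Nat) : Int)) ++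
      PySem.List.slice K (some ((K.idxOf m : Nat) + 1)) none = K.erase m := by
  rw [PySem.List.slice_to_natCast]
  rw [show ((K.idxOf m : Nat) : Int) + 1 = (((K.idxOf m : Nat) + 1 : Nat) : Int) by push_cast; ring,
    PySem.List.slice_from_natCast]
  rw [← List.eraseIdx_eq_take_drop_succ, List.eraseIdx_idxOf_eq_erase]

-- The common input-dependent data of both ports and of D_step.
theorem dists_eq (pt : List Int) (neighbors : List (List Int)) :
    neighbors.map (fun nb => |PySem.List.pyGetD pt 2 0 - PySem.List.pyGetD nb 2 0|) =
      neighbors.map (fun nb => |pt.getD 2 0 - nb.getD 2 0|) := by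
  apply List.map_congr_left
  intro nb hmem
  have h1 : PySem.List.pyGetD pt 2 0 = pt.getD 2 0 := by
    simpa using PySem.List.pyGetD_natCast pt 2 0
  have h2 : PySem.List.pyGetD nb 2 0 = nb.getD 2 0 := by
    simpa using PySem.List.pyGetD_natCast nb 2 0
  rw [h1, h2]


-- Shorthands for the data D_step's let-bindings denote (proof-side only).
def pvL (pt : List Int) (neighbors : List (List Int)) : List Int :=
  neighbors.map (fun nb => |pt.getD 2 0 - nb.getD 2 0|)
def pvM (pt : List Int) (neighbors : List (List Int)) (rule : String) : Int :=
  (if rule = "min" then (pvL pt neighbors).min? else (pvL pt neighbors).max?).getD 0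
def pvV2 (pt : List Int) (neighbors : List (List Int)) (rule : String) : Int :=
  (if rule = "min" then ((pvL pt neighbors).erase (pvM pt neighbors rule)).min?
   else ((pvL pt neighbors).erase (pvM pt neighbors rule)).max?).getD 0

theorem D_iff (pt : List Int) (neighbors : List (List Int)) (memoria : List (List Int)) (rule : String) :
    D_step pt neighbors memoria rule ↔
      (rule = "min" ∨ rule = "max") ∧
      neighbors.getD ((pvL pt neighbors).idxOf (pvM pt neighbors rule)) [] ∈ memoria ∧
      neighbors.getD (if pvV2 pt neighbors rule = pvM pt neighbors rule then 0 else 1) [] ≠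
        neighbors.getD ((pvL pt neighbors).idxOf (pvV2 pt neighbors rule)) [] := by
  simp only [D_step, pvL, pvM, pvV2]

-- Both branches of the rules "min"/"max", the trivial rule, the non-fallback path,
-- and the fallback characterisation.
theorem key_triv (pt : List Int) (neighbors : List (List Int)) (memoria : List (List Int)) (rule : String)
    (hmin : rule ≠ "min") (hmax : rule ≠ "max") :
    step pt neighbors memoria rule = step_alt pt neighbors memoria rule := by
  simp only [step, step_alt, if_neg hmin, if_neg hmax, if_pos (And.intro hmin hmax)]

theorem key_min (pt : List Int) (neighbors : List (List Int)) (memoria : List (List Int))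
    (hne : neighbors ≠ []) :
    (neighbors.getD ((pvL pt neighbors).idxOf (pvM pt neighbors "min")) [] ∉ memoria →
      step pt neighbors memoria "min" = step_alt pt neighbors memoria "min") ∧
    (2 ≤ neighbors.length →
      neighbors.getD ((pvL pt neighbors).idxOf (pvM pt neighbors "min")) [] ∈ memoria →
      step pt neighbors memoria "min" =
        neighbors.getD (if pvV2 pt neighbors "min" = pvM pt neighbors "min" then 0 else 1) [] ∧
      step_alt pt neighbors memoria "min" =
        neighbors.getD ((pvL pt neighbors).idxOf (pvV2 pt neighbors "min")) []) := by
  have hKne : pvL pt neighbors ≠ [] := by simp [pvL, hne]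
  obtain ⟨a, hmina⟩ : ∃ a, (pvL pt neighbors).min? = some a := by
    cases hk : (pvL pt neighbors).min? with
    | none => exact absurd (List.min?_eq_none_iff.mp hk) hKne
    | some a => exact ⟨a, rfl⟩
  have haK : a ∈ pvL pt neighbors := (List.min?_eq_some_iff.mp hmina).1
  have hMa : pvM pt neighbors "min" = a := by simp [pvM, hmina]
  -- reduce both ports to expressions over pvL
  have hred :
      (step pt neighbors memoria "min" =
        (if neighbors.getD ((pvL pt neighbors).idxOf a) [] ∉ memoria then
          neighbors.getD ((pvL pt neighbors).idxOf a) []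
        else
          PySem.List.pyGetD neighbors
            (((PySem.List.index? (PySem.List.sorted (pvL pt neighbors) (fun x => x) false)
                (PySem.List.pyGetD (PySem.List.sorted (pvL pt neighbors) (fun x => x) false) 1 0)).getD 0 : Nat) : Int) [])) ∧
      (step_alt pt neighbors memoria "min" =
        (if neighbors.getD ((pvL pt neighbors).idxOf a) [] ∉ memoria then
          neighbors.getD ((pvL pt neighbors).idxOf a) []
        else
          PySem.List.pyGetD neighbors
            (((PySem.List.index? (pvL pt neighbors)
              ((PySem.List.slice (pvL pt neighbors) none (some (((pvL pt neighbors).idxOf a : Nat) : Int)) ++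
                PySem.List.slice (pvL pt neighbors) (some ((((pvL pt neighbors).idxOf a : Nat) : Int) + 1)) none).min?.getD 0)).getD 0 : Nat) : Int) [])) := by
    constructor
    · simp only [step, String.reduceEq, reduceIte, PySem.List.foldl_append_singleton_eq_map,
        List.nil_append]
      rw [dists_eq pt neighbors, ← pvL, pymin_eq_min?, hmina, Option.getD_some,
        index?_getD_of_mem _ a haK, PySem.List.pyGetD_natCast]
    · simp only [step_alt, ne_eq, String.reduceEq, not_false_eq_true, not_true, true_and,
        and_false, false_and, and_true, reduceIte]
      rw [dists_eq pt neighbors, ← pvL, pymin_eq_min?, hmina, Option.getD_some,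
        index?_getD_of_mem _ a haK, PySem.List.pyGetD_natCast, pymin_eq_min?]
  obtain ⟨hredA, hredB⟩ := hred
  constructor
  · intro hnfb
    rw [hMa] at hnfb
    rw [hredA, hredB, if_pos hnfb, if_pos hnfb]
  · intro hlen2 hfb
    rw [hMa] at hfb
    have hKlen2 : 2 ≤ (pvL pt neighbors).length := by simp [pvL]; omega
    obtain ⟨a', b, t, hs, hmina', hminb⟩ := sorted_two_min (pvL pt neighbors) hKlen2
    have haa : a' = a := Option.some_inj.mp (hmina'.symm.trans hmina)
    rw [haa] at hs hminb
    have hbK : b ∈ (pvL pt neighbors).erase a := (List.min?_eq_some_iff.mp hminb).1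
    have hbK' : b ∈ pvL pt neighbors := List.mem_of_mem_erase hbK
    have hV2 : pvV2 pt neighbors "min" = b := by
      simp only [pvV2, hMa, String.reduceEq, reduceIte]
      rw [hminb, Option.getD_some]
    constructor
    · rw [hredA, if_neg (not_not_intro hfb), hs]
      have hget1 : PySem.List.pyGetD (a :: b :: t) 1 0 = b := by
        rw [show (1 : Int) = ((1 : Nat) : Int) by norm_num, PySem.List.pyGetD_natCast]; rfl
      rw [hget1, index?_sorted_second a b t, hV2, hMa, PySem.List.pyGetD_natCast]
    · rw [hredB, if_neg (not_not_intro hfb), slices_eq_erase (pvL pt neighbors) a,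
        hminb, Option.getD_some, index?_getD_of_mem _ b hbK', PySem.List.pyGetD_natCast, hV2]

theorem key_max (pt : List Int) (neighbors : List (List Int)) (memoria : List (List Int))
    (hne : neighbors ≠ []) :
    (neighbors.getD ((pvL pt neighbors).idxOf (pvM pt neighbors "max")) [] ∉ memoria →
      step pt neighbors memoria "max" = step_alt pt neighbors memoria "max") ∧
    (2 ≤ neighbors.length →
      neighbors.getD ((pvL pt neighbors).idxOf (pvM pt neighbors "max")) [] ∈ memoria →
      step pt neighbors memoria "max" =
        neighbors.getD (if pvV2 pt neighbors "max" = pvM pt neighbors "max" then 0 else 1) [] ∧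
      step_alt pt neighbors memoria "max" =
        neighbors.getD ((pvL pt neighbors).idxOf (pvV2 pt neighbors "max")) []) := by
  have hKne : pvL pt neighbors ≠ [] := by simp [pvL, hne]
  obtain ⟨a, hmina⟩ : ∃ a, (pvL pt neighbors).max? = some a := by
    cases hk : (pvL pt neighbors).max? with
    | none => exact absurd (List.max?_eq_none_iff.mp hk) hKne
    | some a => exact ⟨a, rfl⟩
  have haK : a ∈ pvL pt neighbors := (List.max?_eq_some_iff.mp hmina).1
  have hMa : pvM pt neighbors "max" = a := by simp [pvM, hmina]
  -- reduce both ports to expressions over pvL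
  have hred :
      (step pt neighbors memoria "max" =
        (if neighbors.getD ((pvL pt neighbors).idxOf a) [] ∉ memoria then
          neighbors.getD ((pvL pt neighbors).idxOf a) []
        else
          PySem.List.pyGetD neighbors
            (((PySem.List.index? (PySem.List.sorted (pvL pt neighbors) (fun x => x) true)
                (PySem.List.pyGetD (PySem.List.sorted (pvL pt neighbors) (fun x => x) true) 1 0)).getD 0 : Nat) : Int) [])) ∧
      (step_alt pt neighbors memoria "max" =
        (if neighbors.getD ((pvL pt neighbors).idxOf a) [] ∉ memoria then
          neighbors.getD ((pvL pt neighbors).idxOf a) []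
        else
          PySem.List.pyGetD neighbors
            (((PySem.List.index? (pvL pt neighbors)
              ((PySem.List.slice (pvL pt neighbors) none (some (((pvL pt neighbors).idxOf a : Nat) : Int)) ++
                PySem.List.slice (pvL pt neighbors) (some ((((pvL pt neighbors).idxOf a : Nat) : Int) + 1)) none).max?.getD 0)).getD 0 : Nat) : Int) [])) := by
    constructor
    · simp only [step, String.reduceEq, reduceIte, PySem.List.foldl_append_singleton_eq_map,
        List.nil_append]
      rw [dists_eq pt neighbors, ← pvL, pymax_eq_max?, hmina, Option.getD_some,
        index?_getD_of_mem _ a haK, PySem.List.pyGetD_natCast]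
    · simp only [step_alt, ne_eq, String.reduceEq, not_false_eq_true, not_true, true_and,
        and_false, false_and, and_true, reduceIte]
      rw [dists_eq pt neighbors, ← pvL, pymax_eq_max?, hmina, Option.getD_some,
        index?_getD_of_mem _ a haK, PySem.List.pyGetD_natCast, pymax_eq_max?]
  obtain ⟨hredA, hredB⟩ := hred
  constructor
  · intro hnfb
    rw [hMa] at hnfb
    rw [hredA, hredB, if_pos hnfb, if_pos hnfb]
  · intro hlen2 hfb
    rw [hMa] at hfb
    have hKlen2 : 2 ≤ (pvL pt neighbors).length := by simp [pvL]; omega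
    obtain ⟨a', b, t, hs, hmina', hminb⟩ := sorted_two_max (pvL pt neighbors) hKlen2
    have haa : a' = a := Option.some_inj.mp (hmina'.symm.trans hmina)
    rw [haa] at hs hminb
    have hbK : b ∈ (pvL pt neighbors).erase a := (List.max?_eq_some_iff.mp hminb).1
    have hbK' : b ∈ pvL pt neighbors := List.mem_of_mem_erase hbK
    have hV2 : pvV2 pt neighbors "max" = b := by
      simp only [pvV2, hMa, String.reduceEq, reduceIte]
      rw [hminb, Option.getD_some]
    constructor
    · rw [hredA, if_neg (not_not_intro hfb), hs]
      have hget1 : PySem.List.pyGetD (a :: b :: t) 1 0 = b := by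
        rw [show (1 : Int) = ((1 : Nat) : Int) by norm_num, PySem.List.pyGetD_natCast]; rfl
      rw [hget1, index?_sorted_second a b t, hV2, hMa, PySem.List.pyGetD_natCast]
    · rw [hredB, if_neg (not_not_intro hfb), slices_eq_erase (pvL pt neighbors) a,
        hminb, Option.getD_some, index?_getD_of_mem _ b hbK', PySem.List.pyGetD_natCast, hV2]

-- the fallback is only reachable (within Pre_step) with at least two neighbors
theorem fb_len2 (pt : List Int) (neighbors : List (List Int)) (memoria : List (List Int)) (rule : String)
    (hpre : Pre_step pt neighbors memoria rule) (hrule : rule = "min" ∨ rule = "max")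
    (hfb : neighbors.getD ((pvL pt neighbors).idxOf (pvM pt neighbors rule)) [] ∈ memoria) :
    2 ≤ neighbors.length := by
  obtain ⟨hp1, hp2⟩ := hpre
  obtain ⟨hne, hsing⟩ := hp2 hrule
  match neighbors, hne, hfb, hsing with
  | [], h, _, _ => exact absurd rfl h
  | [nb], _, hfb, hsing =>
    exfalso
    have h1 : pvL pt [nb] = [|pt.getD 2 0 - nb.getD 2 0|] := by simp [pvL]
    have h2 : pvM pt [nb] rule = |pt.getD 2 0 - nb.getD 2 0| := by
      rcases hrule with h | h <;> simp [pvM, h, h1]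
    rw [h1, h2] at hfb
    simp [List.idxOf_cons_self] at hfb
    exact (hsing rfl) hfb
  | nb1 :: nb2 :: rest, _, _, _ => simp

-- ===== VERDICT (by name: the statement is the Claim_ definition above) =====
theorem step_spec : Claim_unchanged_step := by
  intro pt neighbors memoria rule _hdom hpre hnd
  by_cases hmin : rule = "min"
  · subst hmin
    obtain ⟨hp1, hp2⟩ := hpre
    obtain ⟨hne, hsing⟩ := hp2 (Or.inl rfl)
    obtain ⟨keyA, keyB⟩ := key_min pt neighbors memoria hne
    by_cases hfb : neighbors.getD ((pvL pt neighbors).idxOf (pvM pt neighbors "min")) [] ∈ memoria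
    · have hlen2 := fb_len2 pt neighbors memoria "min" ⟨hp1, hp2⟩ (Or.inl rfl) hfb
      obtain ⟨hA, hB⟩ := keyB hlen2 hfb
      rw [hA, hB]
      by_contra h
      exact hnd ((D_iff pt neighbors memoria "min").mpr ⟨Or.inl rfl, hfb, h⟩)
    · exact keyA hfb
  · by_cases hmax : rule = "max"
    · subst hmax
      obtain ⟨hp1, hp2⟩ := hpre
      obtain ⟨hne, hsing⟩ := hp2 (Or.inr rfl)
      obtain ⟨keyA, keyB⟩ := key_max pt neighbors memoria hne
      by_cases hfb : neighbors.getD ((pvL pt neighbors).idxOf (pvM pt neighbors "max")) [] ∈ memoria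
      · have hlen2 := fb_len2 pt neighbors memoria "max" ⟨hp1, hp2⟩ (Or.inr rfl) hfb
        obtain ⟨hA, hB⟩ := keyB hlen2 hfb
        rw [hA, hB]
        by_contra h
        exact hnd ((D_iff pt neighbors memoria "max").mpr ⟨Or.inr rfl, hfb, h⟩)
      · exact keyA hfb
    · exact key_triv pt neighbors memoria rule hmin hmax
theorem step_changed : Claim_changed_step := by unfold Claim_changed_step; decide
theorem step_tight : Claim_exact_step := by
  intro pt neighbors memoria rule _hdom hpre hd
  rw [D_iff] at hd
  obtain ⟨hrule, hfb, hneq⟩ := hd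
  have hne : neighbors ≠ [] := (hpre.2 hrule).1
  have hlen2 := fb_len2 pt neighbors memoria rule hpre hrule hfb
  rcases hrule with h | h
  · subst h
    obtain ⟨_, keyB⟩ := key_min pt neighbors memoria hne
    obtain ⟨hA, hB⟩ := keyB hlen2 hfb
    rw [hA, hB]
    exact hneq
  · subst h
    obtain ⟨_, keyB⟩ := key_max pt neighbors memoria hne
    obtain ⟨hA, hB⟩ := keyB hlen2 hfb
    rw [hA, hB]
    exact hneq
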